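-- pv_equiv track=rewrite | github.com/yeeliang94/XBRL-Agent | scout/calibrator.py | _build_search_window
-- ===== SOURCE A (Python) =====
-- _SEARCH_RADIUS = 10
--
-- def _build_search_window(stated_page: int, pdf_length: int) -> list[int]:
--     """Build ordered list of candidate pages to probe.
--
--     Starts at stated_page, then alternates outward (±1, ±2, ...).
--     All values clamped to [1, pdf_length].
--     """
--     candidates: list[int] = []
--     seen: set[int] = set()
--
--     def _add(p: int) -> None:
--         if 1 <= p <= pdf_length and p not in seen:
--             candidates.append(p)
--             seen.add(p)
--
--     _add(stated_page)
--     for delta in range(1, _SEARCH_RADIUS + 1):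
--         _add(stated_page + delta)
--         _add(stated_page - delta)
--
--     return candidates
-- ===== SOURCE B (Python) =====
-- _SEARCH_RADIUS = 10
--
-- def _build_search_window(stated_page: int, pdf_length: int) -> list[int]:
--     """Build ordered list of candidate pages to probe.
--
--     Collect the valid window [max(1, stated-R), min(pdf_length, stated+R)] in one
--     shot, then order it by distance from stated_page, the page at +delta before
--     the one at -delta (encoded as the single key 2*distance + (p < stated_page)).
--     """
--     window = range(max(1, stated_page - _SEARCH_RADIUS),
--                    min(pdf_length, stated_page + _SEARCH_RADIUS) + 1)
--     return sorted(window, key=lambda p: 2 * abs(p - stated_page) + (p < stated_page))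
-- ===== Notes on version B (the rewrite author's own statement) =====
-- stated objective: simpler
-- what changed: Replaces the offset-by-offset generate-clamp-dedup loop with building the whole valid window as one range and sorting it by the key 2*|p-stated| + (p < stated), which encodes distance-first, +delta-before--delta ordering.
import Mathlib
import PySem

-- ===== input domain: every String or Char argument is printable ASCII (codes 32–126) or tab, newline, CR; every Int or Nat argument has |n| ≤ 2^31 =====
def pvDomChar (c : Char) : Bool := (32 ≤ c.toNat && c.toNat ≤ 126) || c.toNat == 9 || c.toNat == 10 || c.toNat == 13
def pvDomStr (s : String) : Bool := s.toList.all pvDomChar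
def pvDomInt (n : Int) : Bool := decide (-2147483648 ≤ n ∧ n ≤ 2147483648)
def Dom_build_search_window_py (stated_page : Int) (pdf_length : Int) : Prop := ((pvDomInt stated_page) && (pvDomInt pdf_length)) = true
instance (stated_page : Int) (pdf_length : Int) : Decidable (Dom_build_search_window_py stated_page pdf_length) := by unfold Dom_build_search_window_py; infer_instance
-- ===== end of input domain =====

-- B replaces A's generate-clamp-dedup loop over offsets by collecting the valid window
-- as one range and sorting it by a distance-first key: simpler, same cost.

-- ===== PORT A =====
-- the nested closure `_add` of A (captures pdf_length; state = (candidates, seen))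
def build_add (pdf_length : Int) (st : List Int × PySem.Set Int) (p : Int) :
    List Int × PySem.Set Int :=
  if 1 ≤ p ∧ p ≤ pdf_length ∧ PySem.Set.contains st.2 p = false then
    (st.1 ++ [p], PySem.Set.add st.2 p)
  else st

def build_search_window_py (stated_page : Int) (pdf_length : Int) : List Int :=
  ((PySem.List.pyRange 1 (10 + 1) 1).foldl
      (fun st delta =>
        build_add pdf_length (build_add pdf_length st (stated_page + delta)) (stated_page - delta))
      (build_add pdf_length (([] : List Int), PySem.Set.empty) stated_page)).1

-- ===== PORT B =====
def build_search_window_py_alt (stated_page : Int) (pdf_length : Int) : List Int :=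
  let window := PySem.List.pyRange (max 1 (stated_page - 10))
      (min pdf_length (stated_page + 10) + 1) 1
  PySem.List.sorted window
    (fun p => 2 * |p - stated_page| + (if p < stated_page then 1 else 0)) false

-- ===== PRECONDITION & SPEC =====
def Spec_build_search_window_py (stated_page : Int) (pdf_length : Int) (out : List Int) : Prop := out = build_search_window_py_alt stated_page pdf_length
instance (stated_page : Int) (pdf_length : Int) (out : List Int) : Decidable (Spec_build_search_window_py stated_page pdf_length out) := by unfold Spec_build_search_window_py; infer_instance

-- ===== CLAIM (what is proved, stated in full; the proofs are below) =====
def Claim_equal_build_search_window_py : Prop := ∀ (stated_page : Int) (pdf_length : Int), Dom_build_search_window_py stated_page pdf_length → Spec_build_search_window_py stated_page pdf_length (build_search_window_py stated_page pdf_length)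

-- ===== LEMMAS AND PROOFS =====

-- the probe offsets of A, in A's emission order
def pvDeltas : List Int := [0,1,-1,2,-2,3,-3,4,-4,5,-5,6,-6,7,-7,8,-8,9,-9,10,-10]

-- loop invariant for A's fold: with fresh, pairwise-distinct probes the seen-set never
-- blocks, so the loop appends exactly the in-range probes (in probe order)
lemma addAll_spec (L : Int) (ps : List Int) (c seen : List Int)
    (hn : ps.Nodup) (hd : ∀ p ∈ ps, PySem.Set.contains seen p = false) :
    ps.foldl (build_add L) (c, seen) =
      (c ++ ps.filter (fun p => decide (1 ≤ p ∧ p ≤ L)),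
       seen ++ ps.filter (fun p => decide (1 ≤ p ∧ p ≤ L))) := by
  induction ps generalizing c seen with
  | nil => simp
  | cons p rest ih =>
    have hdp : p ∉ seen := by simpa [PySem.Set.contains] using hd p (by simp)
    have hrest : rest.Nodup := hn.of_cons
    by_cases hin : 1 ≤ p ∧ p ≤ L
    · have hadd : build_add L (c, seen) p = (c ++ [p], seen ++ [p]) := by
        simp [build_add, PySem.Set.add, PySem.Set.contains, hin, hdp]
      have hd' : ∀ q ∈ rest, PySem.Set.contains (seen ++ [p]) q = false := by
        intro q hq
        have hqp : q ≠ p := by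
          intro h; exact (List.nodup_cons.mp hn).1 (h ▸ hq)
        have hq' : q ∉ seen := by
          simpa [PySem.Set.contains] using hd q (List.mem_cons_of_mem _ hq)
        simp [PySem.Set.contains, hq', hqp]
      simp only [List.foldl_cons, hadd, ih (c ++ [p]) (seen ++ [p]) hrest hd']
      simp [hin]
    · have hadd : build_add L (c, seen) p = (c, seen) := by
        simp [build_add]; intro h1 h2; exact absurd ⟨h1, h2⟩ hin
      simp only [List.foldl_cons, hadd, ih c seen hrest (fun q hq => hd q (List.mem_cons_of_mem _ hq))]
      simp [hin]

-- A computes the filter of its 21 probes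
lemma A_char (s L : Int) :
    build_search_window_py s L =
      (pvDeltas.map (fun d => s + d)).filter (fun p => decide (1 ≤ p ∧ p ≤ L)) := by
  have hrange : PySem.List.pyRange 1 (10 + 1) 1 = [1,2,3,4,5,6,7,8,9,10] := by decide
  have hfold : build_search_window_py s L =
      ((pvDeltas.map (fun d => s + d)).foldl (build_add L)
        (([] : List Int), (PySem.Set.empty : PySem.Set Int))).1 := by
    unfold build_search_window_py
    rw [hrange]
    simp only [pvDeltas, List.map, List.foldl]
    ring_nf
  have hn : (pvDeltas.map (fun d => s + d)).Nodup := by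
    refine List.Nodup.map (fun a b h => by omega) (by decide)
  rw [hfold, addAll_spec L _ [] PySem.Set.empty hn (by intro p _; rfl)]
  simp

-- membership in the probe list is the radius-10 band
lemma mem_probes (s a : Int) :
    a ∈ pvDeltas.map (fun d => s + d) ↔ s - 10 ≤ a ∧ a ≤ s + 10 := by
  simp only [List.mem_map, pvDeltas, List.mem_cons, List.not_mem_nil, or_false]
  constructor
  · rintro ⟨d, hd, rfl⟩; omega
  · intro h; exact ⟨a - s, by omega, by omega⟩

-- A's output lists strictly increasing keys
lemma A_pairwise (s L : Int) :
    ((pvDeltas.map (fun d => s + d)).filter (fun p => decide (1 ≤ p ∧ p ≤ L))).Pairwise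
      (fun a b => 2 * |a - s| + (if a < s then (1:Int) else 0) <
                  2 * |b - s| + (if b < s then (1:Int) else 0)) := by
  refine List.Pairwise.sublist List.filter_sublist ?_
  rw [List.pairwise_map]
  have base : pvDeltas.Pairwise
      (fun a b => 2 * |a| + (if a < 0 then (1:Int) else 0) <
                  2 * |b| + (if b < 0 then (1:Int) else 0)) := by decide
  refine base.imp ?_
  intro a b h
  have h1 : ∀ x : Int, s + x - s = x := by intro x; ring
  have h2 : ∀ x : Int, (s + x < s) = (x < 0) := by
    intro x; simp only [eq_iff_iff]; omega
  simpa [h1, h2] using h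

theorem build_search_window_py_spec : Claim_equal_build_search_window_py := by
  intro s L _
  unfold Spec_build_search_window_py build_search_window_py_alt
  rw [A_char]
  have hperm : ((pvDeltas.map (fun d => s + d)).filter
      (fun p => decide (1 ≤ p ∧ p ≤ L))).Perm
      (PySem.List.pyRange (max 1 (s - 10)) (min L (s + 10) + 1) 1) := by
    have hn1 : ((pvDeltas.map (fun d => s + d)).filter
        (fun p => decide (1 ≤ p ∧ p ≤ L))).Nodup :=
      (List.Nodup.map (fun a b h => by omega) (by decide : pvDeltas.Nodup)).filter _
    have hn2 := PySem.List.nodup_pyRange_one (a := max 1 (s - 10)) (b := min L (s + 10) + 1)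
    rw [List.perm_ext_iff_of_nodup hn1 hn2]
    intro a
    rw [List.mem_filter, PySem.List.mem_pyRange_one, mem_probes]
    simp only [decide_eq_true_eq]
    omega
  exact (PySem.List.sorted_eq_of_perm_of_pairwise_lt _ _ _ hperm (A_pairwise s L)).symm
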